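-- pv_equiv track=rewrite | github.com/SamantazFox/AoC-2020 | day_18/solve.py | findOP
-- ===== SOURCE A (Python) =====
-- def findOP(eq):
-- 	p = eq.find('+')
-- 	m = eq.find('-')
-- 	d = eq.find('/')
-- 	t = eq.find('*')
--
-- 	lst = []
-- 	for n in [p,m,d,t]:
-- 		if n != -1: lst.append(n)
--
-- 	if not lst:
-- 		return -1
-- 	else:
-- 		return min(lst)
-- ===== SOURCE B (Python) =====
-- def findOP(eq):
-- 	# Single left-to-right pass: return the index of the first operator character.
-- 	for i, c in enumerate(eq):
-- 		if c in '+-/*':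
-- 			return i
-- 	return -1
-- ===== Notes on version B (the rewrite author's own statement) =====
-- stated objective: idiomatic
-- what changed: Replaces four separate eq.find scans plus a filter-and-min step with one early-exiting left-to-right pass returning the index of the first operator character.
import Mathlib
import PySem

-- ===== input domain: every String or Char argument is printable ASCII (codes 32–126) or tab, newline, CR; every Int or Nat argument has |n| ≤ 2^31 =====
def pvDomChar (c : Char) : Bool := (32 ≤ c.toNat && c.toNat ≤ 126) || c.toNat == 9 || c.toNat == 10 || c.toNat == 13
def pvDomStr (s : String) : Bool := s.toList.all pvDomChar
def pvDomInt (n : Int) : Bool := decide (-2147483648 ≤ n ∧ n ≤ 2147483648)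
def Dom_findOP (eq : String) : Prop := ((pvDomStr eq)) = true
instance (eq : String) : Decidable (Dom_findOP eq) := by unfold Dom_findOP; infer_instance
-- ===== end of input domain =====

-- B replaces A's four separate find scans + filter + min with one early-exiting left-to-right pass; return values identical.

-- ===== PORT A =====
def findOP (eq : String) : Int :=
  let p := PySem.Str.find eq "+"
  let m := PySem.Str.find eq "-"
  let d := PySem.Str.find eq "/"
  let t := PySem.Str.find eq "*"
  let lst := [p, m, d, t].foldl (fun acc n => if n ≠ -1 then acc ++ [n] else acc) []
  if lst.isEmpty then -1
  else
    match PySem.List.min? lst (fun x => x) with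
    | some v => v
    | none => -1

-- ===== PORT B =====
-- 'c in "+-/*"' on a single character is exactly equality with one of the four operator characters (exact).
def findOPgoB : List Char → Int → Int
  | [], _ => -1
  | c :: rest, i =>
    if c == '+' || c == '-' || c == '/' || c == '*' then i else findOPgoB rest (i + 1)

def findOP_alt (eq : String) : Int := findOPgoB eq.toList 0

-- ===== PRECONDITION & SPEC =====
def Spec_findOP (eq : String) (out : Int) : Prop := out = findOP_alt eq
instance (eq : String) (out : Int) : Decidable (Spec_findOP eq out) := by unfold Spec_findOP; infer_instance

-- ===== CLAIM (what is proved, stated in full; the proofs are below) =====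
def Claim_equal_findOP : Prop := ∀ (eq : String), Dom_findOP eq → Spec_findOP eq (findOP eq)

-- ===== LEMMAS AND PROOFS =====

-- A's computation after the four finds, as one function of the four positions.
def packA (p m d t : Int) : Int :=
  let lst := [p, m, d, t].foldl (fun acc n => if n ≠ -1 then acc ++ [n] else acc) []
  if lst.isEmpty then -1
  else
    match PySem.List.min? lst (fun x => x) with
    | some v => v
    | none => -1

lemma findOP_eq_packA (eq : String) :
    findOP eq = packA (PySem.Str.find eq "+") (PySem.Str.find eq "-")
      (PySem.Str.find eq "/") (PySem.Str.find eq "*") := rfl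

def shiftOne (x : Int) : Int := if x = -1 then -1 else 1 + x

lemma shiftOne_ge (x : Int) (hx : -1 ≤ x) : -1 ≤ shiftOne x := by
  unfold shiftOne; split_ifs <;> omega

lemma find_go_shift (c : Char) (cs : List Char) (k : Nat) :
    PySem.Chars.find.go [c] cs k =
      if PySem.Chars.find.go [c] cs 0 = -1 then -1 else (k : Int) + PySem.Chars.find.go [c] cs 0 := by
  induction cs generalizing k with
  | nil => simp [PySem.Chars.find.go]
  | cons h t ih =>
    by_cases hc : h = c
    · simp [PySem.Chars.find.go, List.isPrefixOf, hc]
    · have hpre : ([c].isPrefixOf (h :: t)) = false := by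
        simp [List.isPrefixOf]; exact fun hh => (hc hh.symm).elim
      rw [PySem.Chars.find.go, PySem.Chars.find.go, hpre]
      simp only [Bool.false_eq_true, if_false]
      rw [ih (k + 1), ih (0 + 1)]
      have hge : -1 ≤ PySem.Chars.find.go [c] t 0 := PySem.Chars.neg_one_le_find t [c]
      split_ifs <;> push_cast <;> omega

lemma find_singleton_cons (c a : Char) (rest : List Char) :
    PySem.Chars.find (a :: rest) [c] =
      if a = c then 0 else shiftOne (PySem.Chars.find rest [c]) := by
  by_cases hc : a = c
  · simp [PySem.Chars.find, PySem.Chars.find.go, List.isPrefixOf, hc]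
  · have hpre : ([c].isPrefixOf (a :: rest)) = false := by
      simp [List.isPrefixOf]; exact fun hh => (hc hh.symm).elim
    unfold PySem.Chars.find
    rw [PySem.Chars.find.go, hpre]
    simp only [Bool.false_eq_true, if_false, hc]
    rw [find_go_shift]
    simp [shiftOne]

lemma goB_nonneg_ge (cs : List Char) (i : Int) (hi : 0 ≤ i) : -1 ≤ findOPgoB cs i := by
  induction cs generalizing i with
  | nil => simp [findOPgoB]
  | cons c t ih =>
    rw [findOPgoB]
    split_ifs with h
    · omega
    · exact ih (i + 1) (by omega)

lemma goB_shift (cs : List Char) (i : Int) :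
    findOPgoB cs i = if findOPgoB cs 0 = -1 then -1 else i + findOPgoB cs 0 := by
  induction cs generalizing i with
  | nil => simp [findOPgoB]
  | cons c t ih =>
    rw [findOPgoB, findOPgoB]
    by_cases h : (c == '+' || c == '-' || c == '/' || c == '*') = true
    · rw [if_pos h, if_pos h]; simp
    · rw [if_neg h, if_neg h, ih (i + 1), ih (0 + 1)]
      have := goB_nonneg_ge t 0 le_rfl
      split_ifs <;> omega

set_option maxHeartbeats 1000000 in
lemma packA_zero (p m d t : Int) (hp : -1 ≤ p) (hm : -1 ≤ m) (hd : -1 ≤ d) (ht : -1 ≤ t)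
    (h : p = 0 ∨ m = 0 ∨ d = 0 ∨ t = 0) : packA p m d t = 0 := by
  by_cases h1 : p = -1 <;> by_cases h2 : m = -1 <;> by_cases h3 : d = -1 <;> by_cases h4 : t = -1 <;>
    simp_all [packA, List.foldl, PySem.List.min?_id_cons, Int.min_def,
      List.cons_append, List.nil_append] <;> omega

set_option maxHeartbeats 1000000 in
lemma packA_shift (p m d t : Int) (hp : -1 ≤ p) (hm : -1 ≤ m) (hd : -1 ≤ d) (ht : -1 ≤ t) :
    packA (shiftOne p) (shiftOne m) (shiftOne d) (shiftOne t) = shiftOne (packA p m d t) := by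
  have e : ∀ x : Int, -1 ≤ x → ((1 + x = -1) = False) := by
    intro x hx; simp only [eq_iff_iff, iff_false]; omega
  by_cases h1 : p = -1 <;> by_cases h2 : m = -1 <;> by_cases h3 : d = -1 <;> by_cases h4 : t = -1 <;>
    simp_all [packA, shiftOne, List.foldl, e _ hp, e _ hm, e _ hd, e _ ht,
      PySem.List.min?_id_cons, Int.min_def, List.cons_append, List.nil_append] <;>
    omega

lemma main_lemma (cs : List Char) :
    packA (PySem.Chars.find cs ['+']) (PySem.Chars.find cs ['-'])
      (PySem.Chars.find cs ['/']) (PySem.Chars.find cs ['*']) = findOPgoB cs 0 := by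
  induction cs with
  | nil => rfl
  | cons a rest ih =>
    rw [find_singleton_cons, find_singleton_cons, find_singleton_cons, find_singleton_cons,
      findOPgoB]
    have hf : ∀ c : Char, -1 ≤ PySem.Chars.find rest [c] :=
      fun c => PySem.Chars.neg_one_le_find rest [c]
    by_cases hop : a = '+' ∨ a = '-' ∨ a = '/' ∨ a = '*'
    · have hb : (a == '+' || a == '-' || a == '/' || a == '*') = true := by
        rcases hop with h | h | h | h <;> simp [h]
      rw [if_pos hb]
      rcases hop with h | h | h | h <;> subst h <;> simp <;>
        refine packA_zero _ _ _ _ ?_ ?_ ?_ ?_ (by tauto) <;>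
          first | omega | exact shiftOne_ge _ (hf _)
    · have h1 : a ≠ '+' := fun h => hop (Or.inl h)
      have h2 : a ≠ '-' := fun h => hop (Or.inr (Or.inl h))
      have h3 : a ≠ '/' := fun h => hop (Or.inr (Or.inr (Or.inl h)))
      have h4 : a ≠ '*' := fun h => hop (Or.inr (Or.inr (Or.inr h)))
      have hb : ¬ ((a == '+' || a == '-' || a == '/' || a == '*') = true) := by
        simp [h1, h2, h3, h4]
      rw [if_neg h1, if_neg h2, if_neg h3, if_neg h4, if_neg hb,
        packA_shift _ _ _ _ (hf _) (hf _) (hf _) (hf _), ih, goB_shift rest (0 + 1)]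
      have := goB_nonneg_ge rest 0 le_rfl
      unfold shiftOne
      split_ifs <;> omega

-- ===== VERDICT (by name: the statement is the Claim_ definition above) =====
theorem findOP_spec : Claim_equal_findOP := by
  intro eq _
  unfold Spec_findOP findOP_alt
  rw [findOP_eq_packA]
  simp only [PySem.Str.find_eq]
  have e1 : ("+" : String).toList = ['+'] := rfl
  have e2 : ("-" : String).toList = ['-'] := rfl
  have e3 : ("/" : String).toList = ['/'] := rfl
  have e4 : ("*" : String).toList = ['*'] := rfl
  rw [e1, e2, e3, e4]
  exact main_lemma eq.toList
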